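-- pv_equiv track=rewrite | github.com/Sixshaman/SolarTears | UtilsBuild/GenerateVulkanFunctionList.py | compile_cpp_header_cpp
-- ===== SOURCE A (Python) =====
-- header_start_cpp = """\
-- #include "VulkanFunctions.hpp"
--
-- #ifdef VK_NO_PROTOTYPES
--
-- #define DEFINE_VULKAN_FUNCTION(funcName) PFN_##funcName funcName;
--
-- extern "C"
-- {
-- """
--
-- header_end_cpp = """\
-- }
--
-- #endif"""
--
-- def compile_cpp_header_cpp(funcs):
-- 	cpp_data = ""
--
-- 	cpp_data += header_start_cpp
--
-- 	current_extension_define = ""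
-- 	current_platform_define  = ""
-- 	tab_level                = ""
-- 	for func in funcs:
-- 		if current_extension_define != func[1] or current_platform_define != func[2]:
-- 			if current_extension_define != "" or current_platform_define != "":
-- 				cpp_data += "#endif\n"
-- 				tab_level = ""
--
-- 			if func[1] != "" or func[2] != "":
-- 				tab_level = "\t"
--
-- 				cpp_data += "\n#if "
--
-- 				if func[1] != "":
-- 					cpp_data += "defined(" + func[1] + ")"
--
-- 					if func[2] != "":
-- 						cpp_data += " && "
-- 					else:
-- 						cpp_data += "\n"
--
-- 				if func[2] != "":
-- 					cpp_data += "defined(" + func[2] + ")\n"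
--
-- 			current_extension_define = func[1]
-- 			current_platform_define  = func[2]
--
-- 		cpp_data += tab_level + "DEFINE_VULKAN_FUNCTION(" + func[0] + ")\n";
--
-- 	if current_extension_define != "" or current_platform_define != "":
-- 	    cpp_data += "#endif\n\n"
--
-- 	cpp_data += header_end_cpp
--
-- 	return cpp_data
-- ===== SOURCE B (Python) =====
-- header_start_cpp = """\
-- #include "VulkanFunctions.hpp"
--
-- #ifdef VK_NO_PROTOTYPES
--
-- #define DEFINE_VULKAN_FUNCTION(funcName) PFN_##funcName funcName;
--
-- extern "C"
-- {
-- """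
--
-- header_end_cpp = """\
-- }
--
-- #endif"""
--
-- def compile_cpp_header_cpp(funcs):
-- 	# Two-level loop over maximal runs of equal (extension, platform) keys:
-- 	# each guarded run is rendered as one self-contained "\n#if ... #endif\n" block.
-- 	out = [header_start_cpp]
-- 	i = 0
-- 	n = len(funcs)
-- 	last_guarded = False
-- 	while i < n:
-- 		ext, plat = funcs[i][1], funcs[i][2]
-- 		guarded = ext != "" or plat != ""
-- 		tab = ""
-- 		if guarded:
-- 			defines = " && ".join("defined(" + d + ")" for d in (ext, plat) if d != "")
-- 			out.append("\n#if " + defines + "\n")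
-- 			tab = "\t"
-- 		while i < n and funcs[i][1] == ext and funcs[i][2] == plat:
-- 			out.append(tab + "DEFINE_VULKAN_FUNCTION(" + funcs[i][0] + ")\n")
-- 			i += 1
-- 		if guarded:
-- 			out.append("#endif\n")
-- 		last_guarded = guarded
-- 	if last_guarded:
-- 		out.append("\n")
-- 	out.append(header_end_cpp)
-- 	return "".join(out)
-- ===== Notes on version B (the rewrite author's own statement) =====
-- stated objective: simpler
-- what changed: B replaces A's per-element state machine (tracking current extension/platform defines and a mutable tab level across iterations, with closing #endif logic split between the loop and a post-loop patch) by a two-level loop over maximal runs of equal (extension, platform) keys, emitting each guarded run as one self-contained #if...#endif block and joining the guard defines with ' && '.join.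
import Mathlib
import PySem

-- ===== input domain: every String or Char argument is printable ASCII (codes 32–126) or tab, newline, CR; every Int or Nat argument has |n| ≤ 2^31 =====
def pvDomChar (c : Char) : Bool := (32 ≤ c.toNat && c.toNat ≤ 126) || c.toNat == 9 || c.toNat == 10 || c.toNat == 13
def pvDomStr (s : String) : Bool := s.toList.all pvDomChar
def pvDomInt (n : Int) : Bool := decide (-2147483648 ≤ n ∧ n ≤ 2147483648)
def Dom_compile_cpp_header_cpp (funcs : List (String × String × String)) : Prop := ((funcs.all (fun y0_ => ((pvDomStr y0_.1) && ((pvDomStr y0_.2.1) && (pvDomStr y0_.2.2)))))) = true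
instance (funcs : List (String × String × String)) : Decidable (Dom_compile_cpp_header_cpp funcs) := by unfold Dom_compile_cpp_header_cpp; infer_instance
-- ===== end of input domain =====

-- B renders the header group by group (maximal runs of equal (extension, platform) keys),
-- each guarded group as one self-contained #if…#endif block — same output, a plainer decomposition.

def headerStartCpp : String :=
  "#include \"VulkanFunctions.hpp\"\n\n#ifdef VK_NO_PROTOTYPES\n\n#define DEFINE_VULKAN_FUNCTION(funcName) PFN_##funcName funcName;\n\nextern \"C\"\n{\n"

def headerEndCpp : String := "}\n\n#endif"

-- ===== PORT A =====
-- one iteration of A's for-loop; state = (cpp_data, current_extension_define, current_platform_define, tab_level)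
def stepA (st : String × String × String × String) (f : String × String × String) :
    String × String × String × String :=
  let cpp := st.1; let ce := st.2.1; let cp := st.2.2.1; let tab := st.2.2.2
  let (cpp, tab) :=
    if ce ≠ f.2.1 ∨ cp ≠ f.2.2 then
      let (cpp, tab) := if ce ≠ "" ∨ cp ≠ "" then (cpp ++ "#endif\n", "") else (cpp, tab)
      if f.2.1 ≠ "" ∨ f.2.2 ≠ "" then
        let cpp := cpp ++ "\n#if "
        let cpp := if f.2.1 ≠ "" then
            cpp ++ ("defined(" ++ f.2.1 ++ ")") ++ (if f.2.2 ≠ "" then " && " else "\n")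
          else cpp
        let cpp := if f.2.2 ≠ "" then cpp ++ ("defined(" ++ f.2.2 ++ ")\n") else cpp
        (cpp, "\t")
      else (cpp, tab)
    else (cpp, tab)
  (cpp ++ tab ++ ("DEFINE_VULKAN_FUNCTION(" ++ f.1 ++ ")\n"), f.2.1, f.2.2, tab)

def compile_cpp_header_cpp (funcs : List (String × String × String)) : String :=
  let st := funcs.foldl stepA (headerStartCpp, "", "", "")
  (if st.2.1 ≠ "" ∨ st.2.2.1 ≠ "" then st.1 ++ "#endif\n\n" else st.1) ++ headerEndCpp

-- ===== PORT B =====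
-- outer while-loop of B: consume one maximal run of equal keys per call;
-- `lastGuarded` is B's last_guarded variable, threaded as a parameter
def altGo (funcs : List (String × String × String)) (lastGuarded : Bool) : String :=
  match funcs with
  | [] => (if lastGuarded then "\n" else "") ++ headerEndCpp
  | f :: rest =>
    let ext := f.2.1
    let plat := f.2.2
    let guarded := ext != "" || plat != ""
    let sameKey : (String × String × String) → Bool := fun g => g.2.1 == ext && g.2.2 == plat
    let grp := f :: rest.takeWhile sameKey
    let rest' := rest.dropWhile sameKey
    let tab := if guarded then "\t" else ""
    let header :=
      if guarded then
        "\n#if " ++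
          String.join (List.intersperse " && "
            (([ext, plat].filter (fun d => d != "")).map (fun d => "defined(" ++ d ++ ")"))) ++
          "\n"
      else ""
    header ++
      String.join (grp.map (fun g => tab ++ ("DEFINE_VULKAN_FUNCTION(" ++ g.1 ++ ")\n"))) ++
      (if guarded then "#endif\n" else "") ++
      altGo rest' guarded
termination_by funcs.length
decreasing_by
  simp only [List.length_cons]
  exact Nat.lt_succ_of_le (List.length_dropWhile_le _ _)

def compile_cpp_header_cpp_alt (funcs : List (String × String × String)) : String :=
  headerStartCpp ++ altGo funcs false

-- ===== PRECONDITION & SPEC =====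
def Spec_compile_cpp_header_cpp (funcs : List (String × String × String)) (out : String) : Prop := out = compile_cpp_header_cpp_alt funcs
instance (funcs : List (String × String × String)) (out : String) : Decidable (Spec_compile_cpp_header_cpp funcs out) := by unfold Spec_compile_cpp_header_cpp; infer_instance

-- ===== CLAIM (what is proved, stated in full; the proofs are below) =====
def Claim_equal_compile_cpp_header_cpp : Prop := ∀ (funcs : List (String × String × String)), Dom_compile_cpp_header_cpp funcs → Spec_compile_cpp_header_cpp funcs (compile_cpp_header_cpp funcs)

-- ===== LEMMAS AND PROOFS =====

theorem join_cons (s : String) (l : List String) : String.join (s :: l) = s ++ String.join l := by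
  suffices h : ∀ (l : List String) (a b : String), l.foldl (· ++ ·) (a ++ b) = a ++ l.foldl (· ++ ·) b by
    simpa [String.join] using h l s ""
  intro l
  induction l with
  | nil => intro a b; rfl
  | cons x xs ih => intro a b; simp only [List.foldl_cons, String.append_assoc, ih]

-- tab level as a function of the current key (A's loop invariant)
def tabOf (e p : String) : String := if e ≠ "" ∨ p ≠ "" then "\t" else ""

-- the string A appends at a key transition
def transStr (e p : String) (f : String × String × String) : String :=
  if e ≠ f.2.1 ∨ p ≠ f.2.2 then
    (if e ≠ "" ∨ p ≠ "" then "#endif\n" else "") ++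
    (if f.2.1 ≠ "" ∨ f.2.2 ≠ "" then
      "\n#if " ++
      (if f.2.1 ≠ "" then ("defined(" ++ f.2.1 ++ ")") ++ (if f.2.2 ≠ "" then " && " else "\n") else "") ++
      (if f.2.2 ≠ "" then ("defined(" ++ f.2.2 ++ ")\n") else "")
     else "")
  else ""

-- A's loop rewritten as suffix-producing structural recursion carrying only the current key
def loopA : List (String × String × String) → String → String → String
  | [], e, p => (if e ≠ "" ∨ p ≠ "" then "#endif\n\n" else "") ++ headerEndCpp
  | f :: rest, e, p =>
      transStr e p f ++ ((tabOf f.2.1 f.2.2 ++ ("DEFINE_VULKAN_FUNCTION(" ++ f.1 ++ ")\n")) ++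
        loopA rest f.2.1 f.2.2)

theorem stepA_eq (acc e p : String) (f : String × String × String) :
    stepA (acc, e, p, tabOf e p) f
      = (acc ++ (transStr e p f ++ (tabOf f.2.1 f.2.2 ++ ("DEFINE_VULKAN_FUNCTION(" ++ f.1 ++ ")\n"))),
         f.2.1, f.2.2, tabOf f.2.1 f.2.2) := by
  simp only [stepA, transStr, tabOf]
  split_ifs <;> simp_all [String.append_assoc] <;> tauto

def finishA (st : String × String × String × String) : String :=
  (if st.2.1 ≠ "" ∨ st.2.2.1 ≠ "" then st.1 ++ "#endif\n\n" else st.1) ++ headerEndCpp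

theorem foldlA_eq (funcs : List (String × String × String)) :
    ∀ acc e p, finishA (funcs.foldl stepA (acc, e, p, tabOf e p)) = acc ++ loopA funcs e p := by
  induction funcs with
  | nil =>
    intro acc e p
    simp only [List.foldl_nil, finishA, loopA]
    split_ifs <;> simp [String.append_assoc]
  | cons f rest ih =>
    intro acc e p
    rw [List.foldl_cons, stepA_eq, ih]
    simp [loopA, String.append_assoc]

-- consuming a run of equal keys inside A's loop
theorem loopA_run (grp : List (String × String × String)) (rest : List (String × String × String))
    (e p : String) (h : ∀ f ∈ grp, f.2.1 = e ∧ f.2.2 = p) :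
    loopA (grp ++ rest) e p
      = String.join (grp.map (fun g => tabOf e p ++ ("DEFINE_VULKAN_FUNCTION(" ++ g.1 ++ ")\n")))
        ++ loopA rest e p := by
  induction grp with
  | nil => simp [String.join]
  | cons f grp ih =>
    obtain ⟨h1, h2⟩ := h f (by simp)
    simp only [List.cons_append, loopA, h1, h2, transStr, List.map_cons, join_cons]
    rw [ih (fun g hg => h g (by simp [hg]))]
    simp [String.append_assoc]

-- B's guard string equals A's guard string for a guarded key
theorem header_eq (e p : String) (hg : e ≠ "" ∨ p ≠ "") :
    ("\n#if " ++
      String.join (List.intersperse " && "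
        (([e, p].filter (fun d => d != "")).map (fun d => "defined(" ++ d ++ ")"))) ++ "\n" : String)
    = "\n#if " ++
      (if e ≠ "" then ("defined(" ++ e ++ ")") ++ (if p ≠ "" then " && " else "\n") else "") ++
      (if p ≠ "" then ("defined(" ++ p ++ ")\n") else "") := by
  by_cases he : e = "" <;> by_cases hp : p = "" <;>
    simp_all [String.join, List.intersperse, String.append_assoc]

theorem altGo_cons (f : String × String × String) (rest : List (String × String × String)) (b : Bool) :
    altGo (f :: rest) b
      = (if (f.2.1 != "" || f.2.2 != "") = true then
           "\n#if " ++
             String.join (List.intersperse " && "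
               (([f.2.1, f.2.2].filter (fun d => d != "")).map (fun d => "defined(" ++ d ++ ")"))) ++
             "\n"
         else "") ++
        String.join ((f :: rest.takeWhile (fun g => g.2.1 == f.2.1 && g.2.2 == f.2.2)).map
          (fun g => (if (f.2.1 != "" || f.2.2 != "") = true then "\t" else "") ++
            ("DEFINE_VULKAN_FUNCTION(" ++ g.1 ++ ")\n"))) ++
        (if (f.2.1 != "" || f.2.2 != "") = true then "#endif\n" else "") ++
        altGo (rest.dropWhile (fun g => g.2.1 == f.2.1 && g.2.2 == f.2.2)) (f.2.1 != "" || f.2.2 != "") := by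
  rw [altGo]

set_option maxHeartbeats 3200000 in
theorem main_lemma (n : ℕ) :
    ∀ funcs : List (String × String × String), funcs.length ≤ n →
    ∀ e p : String,
      (funcs = [] ∨ (e = "" ∧ p = "") ∨
        (∃ f rest, funcs = f :: rest ∧ ¬(f.2.1 = e ∧ f.2.2 = p))) →
      loopA funcs e p
        = (if e ≠ "" ∨ p ≠ "" then "#endif\n" else "") ++ altGo funcs (decide (e ≠ "" ∨ p ≠ "")) := by
  induction n with
  | zero =>
    intro funcs hlen e p _
    have h0 : funcs = [] := List.length_eq_zero_iff.mp (Nat.le_zero.mp hlen)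
    subst h0
    simp only [loopA, altGo, decide_eq_true_eq]
    split_ifs with h
    · rfl
    · rfl
  | succ n ih =>
    intro funcs hlen e p hside
    match funcs with
    | [] =>
      simp only [loopA, altGo, decide_eq_true_eq]
      split_ifs with h
      · rfl
      · rfl
    | f :: rest =>
      have hlen' : rest.length ≤ n := by simpa using hlen
      set ext := f.2.1 with hext
      set plat := f.2.2 with hplat
      set sameKey : (String × String × String) → Bool := fun g => g.2.1 == ext && g.2.2 == plat with hsk
      have hrest : rest = rest.takeWhile sameKey ++ rest.dropWhile sameKey :=
        (List.takeWhile_append_dropWhile).symm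
      have hgrpkeys : ∀ g ∈ rest.takeWhile sameKey, g.2.1 = ext ∧ g.2.2 = plat := by
        intro g hg
        have := List.mem_takeWhile_imp hg
        simp only [hsk, Bool.and_eq_true, beq_iff_eq] at this
        exact this
      have hdroplen : (rest.dropWhile sameKey).length ≤ n :=
        le_trans (List.length_dropWhile_le _ _) hlen'
      have hdropside : rest.dropWhile sameKey = [] ∨ (ext = "" ∧ plat = "") ∨
          (∃ f' rest', rest.dropWhile sameKey = f' :: rest' ∧ ¬(f'.2.1 = ext ∧ f'.2.2 = plat)) := by
        match hd : rest.dropWhile sameKey with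
        | [] => exact Or.inl rfl
        | f' :: rest' =>
          refine Or.inr (Or.inr ⟨f', rest', rfl, ?_⟩)
          have hnp : ¬ sameKey f' = true := by
            have := List.head?_dropWhile_not sameKey rest
            rw [hd] at this; simpa using this
          simp only [hsk, Bool.and_eq_true, beq_iff_eq] at hnp
          intro hc; exact hnp ⟨hc.1, hc.2⟩
      have hguard : decide (ext ≠ "" ∨ plat ≠ "") = (ext != "" || plat != "") := by
        by_cases h1 : ext = "" <;> by_cases h2 : plat = "" <;> simp [h1, h2]
      have hIH := ih (rest.dropWhile sameKey) hdroplen ext plat hdropside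
      rw [hguard] at hIH
      -- expand loopA on the whole first run
      have hloop : loopA (f :: rest) e p
          = transStr e p f ++ ((tabOf ext plat ++ ("DEFINE_VULKAN_FUNCTION(" ++ f.1 ++ ")\n")) ++
            (String.join ((rest.takeWhile sameKey).map
              (fun g => tabOf ext plat ++ ("DEFINE_VULKAN_FUNCTION(" ++ g.1 ++ ")\n"))) ++
             loopA (rest.dropWhile sameKey) ext plat)) := by
        conv_lhs => rw [show (f :: rest) = f :: (rest.takeWhile sameKey ++ rest.dropWhile sameKey) from by rw [← hrest]]
        simp only [loopA, ← hext, ← hplat]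
        rw [loopA_run _ _ _ _ hgrpkeys]
      rw [hloop, hIH]
      rw [altGo_cons, ← hext, ← hplat, ← hsk]
      have htab : (if (ext != "" || plat != "") = true then "\t" else "") = tabOf ext plat := by
        simp only [tabOf]
        by_cases h1 : ext = "" <;> by_cases h2 : plat = "" <;> simp [h1, h2]
      rw [htab, List.map_cons, join_cons]
      by_cases hg : ext ≠ "" ∨ plat ≠ ""
      · -- guarded new key; since the key is guarded, it differs from (e,p) or (e,p) is also it…
        have hne : ¬(ext = e ∧ plat = p) ∨ (e ≠ "" ∨ p ≠ "") := by
          rcases hg with h | h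
          · by_cases hq : ext = e ∧ plat = p
            · exact Or.inr (Or.inl (hq.1 ▸ h))
            · exact Or.inl hq
          · by_cases hq : ext = e ∧ plat = p
            · exact Or.inr (Or.inr (hq.2 ▸ h))
            · exact Or.inl hq
        have hkeyne : ¬(ext = e ∧ plat = p) := by
          rcases hside with h | h | ⟨f', rest', hfr, hne'⟩
          · exact absurd h (by simp)
          · intro hc
            rcases hg with hx | hx
            · exact hx (hc.1.trans h.1)
            · exact hx (hc.2.trans h.2)
          · cases hfr
            exact fun hc => hne' ⟨hc.1, hc.2⟩
        have htr : transStr e p f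
            = (if e ≠ "" ∨ p ≠ "" then "#endif\n" else "") ++
              ("\n#if " ++
                (if ext ≠ "" then ("defined(" ++ ext ++ ")") ++ (if plat ≠ "" then " && " else "\n") else "") ++
                (if plat ≠ "" then ("defined(" ++ plat ++ ")\n") else "")) := by
          simp only [transStr, ← hext, ← hplat]
          rw [if_pos (by tauto), if_pos hg]
        rw [htr, ← header_eq ext plat hg]
        simp [String.append_assoc, hg]
      · -- unguarded new key: ext = plat = ""
        rw [not_or, not_not, not_not] at hg
        obtain ⟨hg1, hg2⟩ := hg
        have htr : transStr e p f = (if e ≠ "" ∨ p ≠ "" then "#endif\n" else "") := by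
          simp only [transStr, ← hext, ← hplat, hg1, hg2]
          by_cases hq : e ≠ "" ∨ p ≠ ""
          · rw [if_pos (by tauto), if_pos hq, if_neg (by simp), String.append_empty]
          · rw [not_or, not_not, not_not] at hq
            rw [if_neg (by simp [hq.1, hq.2]), if_neg (by simp [hq.1, hq.2])]
        have hfg : (ext != "" || plat != "") = false := by simp [hg1, hg2]
        rw [htr, hfg]
        simp only [Bool.false_eq_true, if_false, tabOf, hg1, hg2]
        simp [String.append_assoc]

-- ===== VERDICT (by name: the statement is the Claim_ definition above) =====
theorem compile_cpp_header_cpp_spec : Claim_equal_compile_cpp_header_cpp := by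
  intro funcs _
  unfold Spec_compile_cpp_header_cpp compile_cpp_header_cpp compile_cpp_header_cpp_alt
  have h1 := foldlA_eq funcs headerStartCpp "" ""
  simp only [finishA, tabOf, ne_eq, not_true_eq_false, or_self, if_false] at h1
  rw [h1]
  have h2 := main_lemma funcs.length funcs le_rfl "" ""
    (by cases funcs with
        | nil => exact Or.inl rfl
        | cons f rest =>
          by_cases hk : f.2.1 = "" ∧ f.2.2 = ""
          · exact Or.inr (Or.inl ⟨rfl, rfl⟩)
          · exact Or.inr (Or.inr ⟨f, rest, rfl, hk⟩))
  simp only [ne_eq, not_true_eq_false, or_self, if_false, decide_false] at h2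
  rw [h2]
  simp
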